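-- pv_equiv track=rewrite | github.com/mayyyim/catan_online | backend/app/maps/rasterizer.py | _scale_token_bag
-- ===== SOURCE A (Python) =====
-- from typing import Dict, List, Optional, Set, Tuple
--
-- BASE_TOKEN_BAG = [2, 3, 3, 4, 4, 5, 5, 6, 6, 8, 8, 9, 9, 10, 10, 11, 11, 12]
--
-- def _scale_token_bag(n_needed: int) -> List[int]:
--     if n_needed <= len(BASE_TOKEN_BAG):
--         return BASE_TOKEN_BAG[:n_needed]
--     bag = list(BASE_TOKEN_BAG)
--     extra_pool = [3, 4, 5, 9, 10, 11, 6, 8]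
--     i = 0
--     while len(bag) < n_needed:
--         bag.append(extra_pool[i % len(extra_pool)])
--         i += 1
--     return bag
-- ===== SOURCE B (Python) =====
-- from typing import Dict, List, Optional, Set, Tuple
--
-- BASE_TOKEN_BAG = [2, 3, 3, 4, 4, 5, 5, 6, 6, 8, 8, 9, 9, 10, 10, 11, 11, 12]
--
-- def _scale_token_bag(n_needed: int) -> List[int]:
--     if n_needed <= len(BASE_TOKEN_BAG):
--         return BASE_TOKEN_BAG[:n_needed]
--     extra_pool = [3, 4, 5, 9, 10, 11, 6, 8]
--     q, r = divmod(n_needed - len(BASE_TOKEN_BAG), len(extra_pool))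
--     return BASE_TOKEN_BAG + extra_pool * q + extra_pool[:r]
-- ===== Notes on version B (the rewrite author's own statement) =====
-- stated objective: simpler
-- what changed: The per-element while/append loop with a running index modulo the pool length is replaced by a closed-form construction: divmod of the overflow by the pool length, list repetition and one slice; bulk list operations replace interpreted per-element appends.
import Mathlib
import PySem

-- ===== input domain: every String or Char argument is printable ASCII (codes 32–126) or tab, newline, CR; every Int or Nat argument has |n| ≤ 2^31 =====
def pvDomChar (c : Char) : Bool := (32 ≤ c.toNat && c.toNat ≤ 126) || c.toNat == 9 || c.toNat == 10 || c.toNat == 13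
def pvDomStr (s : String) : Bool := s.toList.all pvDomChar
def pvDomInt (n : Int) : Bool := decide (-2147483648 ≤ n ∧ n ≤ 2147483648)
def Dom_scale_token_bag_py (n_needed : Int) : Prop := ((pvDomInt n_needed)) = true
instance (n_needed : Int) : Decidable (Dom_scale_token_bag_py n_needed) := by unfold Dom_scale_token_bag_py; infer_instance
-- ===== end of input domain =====

-- B replaces A's per-element while/append/modulo loop by a closed-form divmod + list-repetition + slice construction (objective: simpler).

-- ===== PORT A =====
def pvBase : List Int := [2, 3, 3, 4, 4, 5, 5, 6, 6, 8, 8, 9, 9, 10, 10, 11, 11, 12]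
def pvPool : List Int := [3, 4, 5, 9, 10, 11, 6, 8]

-- A's while loop: append extra_pool[i % len(extra_pool)] until len(bag) == n_needed.
-- pyGetD with default 0 is exact here: the index i % 8 is always in range, Python never raises.
def pvLoopA (n : Int) (bag : List Int) (i : Int) : List Int :=
  if (bag.length : Int) < n then
    pvLoopA n (bag ++ [PySem.List.pyGetD pvPool (PySem.Int.mod i (pvPool.length : Int)) 0]) (i + 1)
  else bag
termination_by (n - bag.length).toNat
decreasing_by simp; omega

def scale_token_bag_py (n_needed : Int) : List Int :=
  if n_needed ≤ (pvBase.length : Int) then PySem.List.slice pvBase none (some n_needed)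
  else pvLoopA n_needed pvBase 0

-- ===== PORT B =====
def scale_token_bag_py_alt (n_needed : Int) : List Int :=
  if n_needed ≤ (pvBase.length : Int) then PySem.List.slice pvBase none (some n_needed)
  else
    let extra := n_needed - (pvBase.length : Int)
    let q := PySem.Int.floordiv extra (pvPool.length : Int)
    let r := PySem.Int.mod extra (pvPool.length : Int)
    -- extra_pool * q (q ≥ 0 here; Python's list-repeat is empty for q ≤ 0, as is replicate q.toNat)
    pvBase ++ (List.replicate q.toNat pvPool).flatten ++ pvPool.take r.toNat

-- ===== PRECONDITION & SPEC =====
def Spec_scale_token_bag_py (n_needed : Int) (out : List Int) : Prop := out = scale_token_bag_py_alt n_needed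
instance (n_needed : Int) (out : List Int) : Decidable (Spec_scale_token_bag_py n_needed out) := by unfold Spec_scale_token_bag_py; infer_instance

-- ===== CLAIM (what is proved, stated in full; the proofs are below) =====
def Claim_equal_scale_token_bag_py : Prop := ∀ (n_needed : Int), Dom_scale_token_bag_py n_needed → Spec_scale_token_bag_py n_needed (scale_token_bag_py n_needed)

-- ===== LEMMAS AND PROOFS =====

-- the sequence of elements A's loop appends, starting at counter value i (i kept as a Nat)
def pvGen : Nat → Nat → List Int
  | 0, _ => []
  | k + 1, i => PySem.List.pyGetD pvPool ((i % 8 : Nat) : Int) 0 :: pvGen k (i + 1)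

lemma pvLoopA_eq_gen (k : Nat) : ∀ (bag : List Int) (i : Nat),
    pvLoopA ((bag.length + k : Nat) : Int) bag i = bag ++ pvGen k i := by
  induction k with
  | zero =>
    intro bag i
    rw [pvLoopA]
    simp [pvGen]
  | succ k ih =>
    intro bag i
    rw [pvLoopA]
    have hlt : (bag.length : Int) < ((bag.length + (k + 1) : Nat) : Int) := by push_cast; omega
    rw [if_pos hlt]
    have hmod : PySem.Int.mod (i : Int) ((pvPool.length : Nat) : Int) = ((i % 8 : Nat) : Int) := by
      simp [pvPool]
    have hlen : ((bag.length + (k + 1) : Nat) : Int)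
        = (((bag ++ [PySem.List.pyGetD pvPool ((i % 8 : Nat) : Int) 0]).length + k : Nat) : Int) := by
      simp; omega
    have hcast : ((i : Int) + 1) = ((i + 1 : Nat) : Int) := by omega
    rw [show ((pvPool.length : Nat) : Int) = ((8 : Nat) : Int) by norm_num [pvPool]] at hmod ⊢
    rw [hmod, hcast, hlen, ih]
    simp [pvGen]

lemma pvGen_add (a : Nat) : ∀ (b i : Nat), pvGen (a + b) i = pvGen a i ++ pvGen b (i + a) := by
  induction a with
  | zero => intro b i; simp [pvGen]
  | succ a ih =>
    intro b i
    have h : a + 1 + b = (a + b) + 1 := by omega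
    have h2 : i + 1 + a = i + (a + 1) := by omega
    rw [h, pvGen, pvGen, ih, h2]
    simp

lemma pvGen_small (r m : Nat) (hr : r ≤ 8) : pvGen r (8 * m) = pvPool.take r := by
  interval_cases r <;>
    simp [pvGen, pvPool, Nat.add_assoc, Nat.mul_mod_right, PySem.List.pyGetD]

lemma pvGen_blocks (q : Nat) : pvGen (8 * q) 0 = (List.replicate q pvPool).flatten := by
  induction q with
  | zero => simp [pvGen]
  | succ q ih =>
    have h : 8 * (q + 1) = 8 * q + 8 := by ring
    rw [h, pvGen_add, ih]
    rw [show (0 + 8 * q) = 8 * q from by omega, pvGen_small 8 q (by omega)]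
    simp [List.replicate_succ', pvPool]

lemma pvGen_closed (q r : Nat) (hr : r ≤ 8) :
    pvGen (8 * q + r) 0 = (List.replicate q pvPool).flatten ++ pvPool.take r := by
  rw [pvGen_add, pvGen_blocks, show (0 + 8 * q) = 8 * q from by omega, pvGen_small r q hr]

-- ===== VERDICT (by name: the statement is the Claim_ definition above) =====
theorem scale_token_bag_py_spec : Claim_equal_scale_token_bag_py := by
  intro n _
  unfold Spec_scale_token_bag_py scale_token_bag_py scale_token_bag_py_alt
  by_cases h : n ≤ (pvBase.length : Int)
  · rw [if_pos h, if_pos h]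
  · rw [if_neg h, if_neg h]
    have h18 : (pvBase.length : Int) = 18 := by norm_num [pvBase]
    have hn : 18 < n := by omega
    set e : Nat := (n - 18).toNat with he
    have hne : n = ((18 + e : Nat) : Int) := by push_cast; omega
    have hbag : ((18 + e : Nat) : Int) = ((pvBase.length + e : Nat) : Int) := by
      norm_num [pvBase]
    have hA : pvLoopA n pvBase 0 = pvBase ++ pvGen e 0 := by
      rw [hne, hbag]
      exact pvLoopA_eq_gen e pvBase 0
    have hextra : n - (pvBase.length : Int) = ((e : Nat) : Int) := by
      rw [h18]; omega
    have hq : PySem.Int.floordiv (n - (pvBase.length : Int)) ((pvPool.length : Nat) : Int)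
        = ((e / 8 : Nat) : Int) := by
      rw [hextra, show ((pvPool.length : Nat) : Int) = ((8 : Nat) : Int) from by norm_num [pvPool]]
      exact PySem.Int.floordiv_natCast e 8
    have hr : PySem.Int.mod (n - (pvBase.length : Int)) ((pvPool.length : Nat) : Int)
        = ((e % 8 : Nat) : Int) := by
      rw [hextra, show ((pvPool.length : Nat) : Int) = ((8 : Nat) : Int) from by norm_num [pvPool]]
      exact PySem.Int.mod_natCast e 8
    rw [hA]
    show pvBase ++ pvGen e 0
        = pvBase ++ (List.replicate (PySem.Int.floordiv (n - (pvBase.length : Int)) ((pvPool.length : Nat) : Int)).toNat pvPool).flatten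
            ++ pvPool.take (PySem.Int.mod (n - (pvBase.length : Int)) ((pvPool.length : Nat) : Int)).toNat
    rw [hq, hr, Int.toNat_natCast, Int.toNat_natCast]
    conv_lhs => rw [show e = 8 * (e / 8) + e % 8 from by omega]
    rw [pvGen_closed (e / 8) (e % 8) (by omega)]
    simp
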